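-- pv_equiv track=rewrite | github.com/xrv3ovl/ShadowStrike | add_logging_to_tests.py | add_logging_to_test_function
-- ===== SOURCE A (Python) =====
-- def add_logging_to_test_function(test_func, test_name, filename_prefix):
--     """Add logging to a single test function."""
--     # Extract function body
--     lines = test_func.split('\n')
--
--     # Find the opening brace of the test
--     brace_idx = -1
--     for i, line in enumerate(lines):
--         if '{' in line:
--             brace_idx = i
--             break
--
--     if brace_idx == -1:
--         return test_func
--
--     # Check if logging is already present
--     func_body = '\n'.join(lines[brace_idx+1:])
--     if 'SS_LOG_INFO' in func_body and f'[{test_name}]' in func_body: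
--         return test_func  # Already has logging
--
--     # Insert SS_LOG_INFO after opening brace
--     indent = "    "
--     log_line = f'{indent}SS_LOG_INFO(L"{filename_prefix}", L"[{test_name}] Testing...");'
--
--     lines.insert(brace_idx + 1, log_line)
--
--     return '\n'.join(lines)
-- ===== SOURCE B (Python) =====
-- def add_logging_to_test_function(test_func, test_name, filename_prefix):
--     """Add logging to a single test function (string-splice version)."""
--     pos = test_func.find('{')
--     if pos == -1:
--         return test_func
--     nl = test_func.find('\n', pos)
--     body = test_func[nl + 1:] if nl != -1 else ''
--     if 'SS_LOG_INFO' in body and f'[{test_name}]' in body: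
--         return test_func
--     log_line = f'    SS_LOG_INFO(L"{filename_prefix}", L"[{test_name}] Testing...");'
--     if nl == -1:
--         return test_func + '\n' + log_line
--     return test_func[:nl] + '\n' + log_line + test_func[nl:]
-- ===== Notes on version B (the rewrite author's own statement) =====
-- stated objective: simpler
-- what changed: Replaces the split-into-lines list representation (split, enumerate loop with break, list.insert, join) with direct string index arithmetic: find the first '{', find the next '\n', and splice the log line in with two slices.
import Mathlib
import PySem

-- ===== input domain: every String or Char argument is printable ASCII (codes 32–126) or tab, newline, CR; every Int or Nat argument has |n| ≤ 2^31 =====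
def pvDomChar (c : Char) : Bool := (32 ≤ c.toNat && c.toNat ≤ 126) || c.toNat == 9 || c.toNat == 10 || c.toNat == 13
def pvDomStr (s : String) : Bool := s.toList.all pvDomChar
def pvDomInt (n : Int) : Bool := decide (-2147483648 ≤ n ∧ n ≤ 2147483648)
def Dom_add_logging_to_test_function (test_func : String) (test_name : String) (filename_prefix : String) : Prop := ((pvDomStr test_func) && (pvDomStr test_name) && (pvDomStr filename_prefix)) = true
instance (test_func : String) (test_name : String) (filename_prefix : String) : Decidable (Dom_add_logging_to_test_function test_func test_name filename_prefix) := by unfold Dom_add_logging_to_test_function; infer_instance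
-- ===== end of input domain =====

-- B replaces A's split-into-lines list processing (split, enumerate loop, list.insert, join)
-- with direct string index arithmetic (find the '{', find the next '\n', splice with slices).

-- ===== PORT A =====
-- the for-loop over enumerate(lines) with break: first index whose line contains '{', else -1
def findBraceIdxA : List String → Int → Int
  | [], _ => -1
  | line :: rest, i => if PySem.Str.isIn "{" line then i else findBraceIdxA rest (i + 1)

def add_logging_to_test_function (test_func : String) (test_name : String) (filename_prefix : String) : String :=
  -- test_func.split('\n'): separator is the non-empty "\n", so split? is always `some`
  let lines := (PySem.Str.split? test_func "\n").getD []
  let brace_idx := findBraceIdxA lines 0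
  if brace_idx = -1 then test_func
  else
    let func_body := PySem.Str.join "\n" (PySem.List.slice lines (some (brace_idx + 1)) none)
    if PySem.Str.isIn "SS_LOG_INFO" func_body && PySem.Str.isIn ("[" ++ test_name ++ "]") func_body then
      test_func
    else
      let indent := "    "
      let log_line := indent ++ "SS_LOG_INFO(L\"" ++ filename_prefix ++ "\", L\"[" ++ test_name ++ "] Testing...\");"
      let lines2 := PySem.List.insert lines (brace_idx + 1) log_line
      PySem.Str.join "\n" lines2

-- ===== PORT B =====
def add_logging_to_test_function_alt (test_func : String) (test_name : String) (filename_prefix : String) : String :=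
  let pos := PySem.Str.find test_func "{"
  if pos = -1 then test_func
  else
    let nl := PySem.Str.findFrom test_func "\n" pos
    let body := if nl ≠ -1 then PySem.Str.slice test_func (some (nl + 1)) none else ""
    if PySem.Str.isIn "SS_LOG_INFO" body && PySem.Str.isIn ("[" ++ test_name ++ "]") body then
      test_func
    else
      let log_line := "    SS_LOG_INFO(L\"" ++ filename_prefix ++ "\", L\"[" ++ test_name ++ "] Testing...\");"
      if nl = -1 then test_func ++ "\n" ++ log_line
      else PySem.Str.slice test_func none (some nl) ++ "\n" ++ log_line ++ PySem.Str.slice test_func (some nl) none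

-- ===== PRECONDITION & SPEC =====
def Spec_add_logging_to_test_function (test_func : String) (test_name : String) (filename_prefix : String) (out : String) : Prop := out = add_logging_to_test_function_alt test_func test_name filename_prefix
instance (test_func : String) (test_name : String) (filename_prefix : String) (out : String) : Decidable (Spec_add_logging_to_test_function test_func test_name filename_prefix out) := by unfold Spec_add_logging_to_test_function; infer_instance

-- ===== CLAIM (what is proved, stated in full; the proofs are below) =====
def Claim_equal_add_logging_to_test_function : Prop := ∀ (test_func : String) (test_name : String) (filename_prefix : String), Dom_add_logging_to_test_function test_func test_name filename_prefix → Spec_add_logging_to_test_function test_func test_name filename_prefix (add_logging_to_test_function test_func test_name filename_prefix)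

-- ===== LEMMAS AND PROOFS =====

-- char-level abstractions of the two computations
def logC (tn fp : List Char) : List Char :=
  "    SS_LOG_INFO(L\"".toList ++ fp ++ "\", L\"[".toList ++ tn ++ "] Testing...\");".toList

def hasLog (body tn : List Char) : Bool :=
  PySem.Chars.isIn "SS_LOG_INFO".toList body && PySem.Chars.isIn ('[' :: (tn ++ [']'])) body

def braceIdx? : List (List Char) → Option Nat
  | [] => none
  | l :: rest => if '{' ∈ l then some 0 else (braceIdx? rest).map (· + 1)

def coreA (s tn fp : List Char) : List Char :=
  let L := s.splitOnP (· == '\n')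
  match braceIdx? L with
  | none => s
  | some j =>
      let body := List.intercalate ['\n'] (L.drop (j + 1))
      if hasLog body tn then s
      else List.intercalate ['\n'] (L.take (j + 1) ++ logC tn fp :: L.drop (j + 1))

def coreB (s tn fp : List Char) : List Char :=
  if '{' ∈ s then
    let p := s.idxOf '{'
    if '\n' ∈ s.drop p then
      let nl := p + (s.drop p).idxOf '\n'
      if hasLog (s.drop (nl + 1)) tn then s
      else s.take nl ++ '\n' :: (logC tn fp ++ '\n' :: s.drop (nl + 1))
    else
      if hasLog [] tn then s else s ++ '\n' :: logC tn fp
  else s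

-- find on a one-character needle is idxOf
theorem findgo_single (c : Char) (l : List Char) (k : Nat) :
    PySem.Chars.find.go [c] l k = if c ∈ l then ((k : Int) + l.idxOf c) else -1 := by
  induction l generalizing k with
  | nil => simp [PySem.Chars.find.go]
  | cons a t ih =>
    rw [PySem.Chars.find.go]
    by_cases h : c = a
    · simp [h, List.isPrefixOf, List.idxOf_cons]
    · have h' : (a == c) = false := by simp [Ne.symm h]
      simp [List.isPrefixOf, h, ih, List.idxOf_cons, h', Ne.symm h]
      split <;> push_cast <;> omega

theorem find_single (c : Char) (l : List Char) :
    PySem.Chars.find l [c] = if c ∈ l then (l.idxOf c : Int) else -1 := by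
  simpa using findgo_single c l 0

theorem isIn_single (c : Char) (l : List Char) :
    PySem.Chars.isIn [c] l = decide (c ∈ l) := by
  rw [PySem.Chars.isIn, find_single]
  by_cases h : c ∈ l <;> simp [h] <;> omega

-- PySem's fueled splitter on a one-character separator is splitOnP
theorem splitOnGo_single (c : Char) :
    ∀ (fuel : Nat) (l cur : List Char) (acc : List (List Char)), l.length ≤ fuel →
    PySem.Chars.splitOn.go [c] fuel l cur acc
      = acc.reverse ++ (l.splitOnP (· == c)).modifyHead (cur.reverse ++ ·) := by
  intro fuel
  induction fuel with
  | zero =>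
    intro l cur acc h
    have : l = [] := List.eq_nil_of_length_eq_zero (by omega)
    subst this
    simp [PySem.Chars.splitOn.go]
  | succ fuel ih =>
    intro l cur acc h
    cases l with
    | nil => simp [PySem.Chars.splitOn.go]
    | cons a t =>
      rw [PySem.Chars.splitOn.go]
      by_cases hc : c = a
      · subst hc
        have hpre : List.isPrefixOf [c] (c :: t) = true := by simp [List.isPrefixOf]
        simp only [hpre, if_true]
        rw [ih _ _ _ (by simpa using Nat.le_of_succ_le_succ h)]
        obtain ⟨x, xs, hx⟩ := List.exists_cons_of_ne_nil (List.splitOnP_ne_nil (· == c) t)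
        simp [List.splitOnP_cons, hx]
      · have hpre : List.isPrefixOf [c] (a :: t) = false := by
          simp [List.isPrefixOf]; exact hc
        simp only [hpre]
        rw [if_neg (by simp)]
        rw [ih _ _ _ (by simpa using Nat.le_of_succ_le_succ h)]
        obtain ⟨x, xs, hx⟩ := List.exists_cons_of_ne_nil (List.splitOnP_ne_nil (· == c) t)
        have hac : (a == c) = false := beq_eq_false_iff_ne.mpr (Ne.symm hc)
        simp [List.splitOnP_cons, hx, hac]

theorem splitOn_single (c : Char) (l : List Char) :
    PySem.Chars.splitOn l [c] = l.splitOnP (· == c) := by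
  rw [PySem.Chars.splitOn, splitOnGo_single c (l.length + 1) l [] [] (by omega)]
  obtain ⟨x, xs, hx⟩ := List.exists_cons_of_ne_nil (List.splitOnP_ne_nil (· == c) l)
  simp [hx]

theorem braceIdx?_lt {L : List (List Char)} {j : Nat} (h : braceIdx? L = some j) :
    j < L.length := by
  induction L generalizing j with
  | nil => simp [braceIdx?] at h
  | cons l rest ih =>
    rw [braceIdx?] at h
    split at h
    · cases h; simp
    · cases hr : braceIdx? rest with
      | none => rw [hr] at h; simp at h
      | some j' => rw [hr] at h; cases h; have := ih hr; simp; omega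

theorem braceIdx?_none_iff {L : List (List Char)} :
    braceIdx? L = none ↔ ∀ l ∈ L, '{' ∉ l := by
  induction L with
  | nil => simp [braceIdx?]
  | cons l rest ih =>
    rw [braceIdx?]
    by_cases h : '{' ∈ l
    · simp [h]
    · cases hr : braceIdx? rest <;> simp [h, hr, ← ih]

theorem mem_splitOnP_iff {a c : Char} (h : a ≠ c) (s : List Char) :
    (∃ l ∈ s.splitOnP (· == c), a ∈ l) ↔ a ∈ s := by
  induction s with
  | nil => simp
  | cons x xs ih =>
    by_cases hx : x = c
    · subst hx
      simp only [List.splitOnP_cons, beq_self_eq_true, if_true]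
      simp [ih, h]
    · have hb : (x == c) = false := beq_eq_false_iff_ne.mpr hx
      obtain ⟨p, ps, hp⟩ := List.exists_cons_of_ne_nil (List.splitOnP_ne_nil (· == c) xs)
      simp only [List.splitOnP_cons, hb, Bool.false_eq_true, if_false, hp, List.modifyHead_cons]
      constructor
      · rintro ⟨l, hl, hal⟩
        rcases List.mem_cons.mp hl with rfl | hl
        · rcases List.mem_cons.mp hal with rfl | hal
          · simp
          · exact List.mem_cons_of_mem _ (ih.mp ⟨p, by simp [hp], hal⟩)
        · exact List.mem_cons_of_mem _ (ih.mp ⟨l, by simp [hp, hl], hal⟩)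
      · intro hmem
        rcases List.mem_cons.mp hmem with rfl | hmem
        · exact ⟨a :: p, by simp, by simp⟩
        · obtain ⟨l, hl, hal⟩ := ih.mpr hmem
          rw [hp] at hl
          rcases List.mem_cons.mp hl with rfl | hl
          · exact ⟨x :: l, by simp, List.mem_cons_of_mem _ hal⟩
          · exact ⟨l, by simp [hl], hal⟩

theorem findBraceIdxA_eq (L : List String) (k : Int) :
    findBraceIdxA L k = match braceIdx? (L.map String.toList) with
                        | none => -1
                        | some j => k + j := by
  induction L generalizing k with
  | nil => simp [findBraceIdxA, braceIdx?]
  | cons line rest ih =>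
    rw [findBraceIdxA]
    simp only [List.map_cons]
    rw [braceIdx?]
    have : PySem.Str.isIn "{" line = decide ('{' ∈ line.toList) := by
      rw [PySem.Str.isIn_eq]
      exact isIn_single '{' line.toList
    rw [this]
    by_cases h : '{' ∈ line.toList
    · simp [h]
    · simp only [h, decide_false, if_false, List.map_cons, ih]
      cases hr : braceIdx? (rest.map String.toList) <;> simp <;> push_cast <;> ring

theorem intercalate_cons_ne_nil (sep a : List Char) {M : List (List Char)} (h : M ≠ []) :
    List.intercalate sep (a :: M) = a ++ sep ++ List.intercalate sep M := by
  obtain ⟨m, ms, rfl⟩ := List.exists_cons_of_ne_nil h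
  simp [List.intercalate, List.intersperse]

theorem intercalate_splitOnP_newline (s : List Char) :
    List.intercalate ['\n'] (s.splitOnP (· == '\n')) = s := by
  simpa [List.splitOn] using List.intercalate_splitOn s '\n'

theorem not_mem_take_idxOf (a : Char) (l : List Char) : a ∉ l.take (l.idxOf a) := by
  induction l with
  | nil => simp
  | cons b t ih =>
    by_cases h : b = a
    · simp [h, List.idxOf_cons]
    · have hba : (b == a) = false := beq_eq_false_iff_ne.mpr h
      simp only [List.idxOf_cons, hba, Bool.false_eq_true, if_false, List.take_succ_cons]
      intro hcon
      rcases List.mem_cons.mp hcon with rfl | hmem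
      exacts [h rfl, ih hmem]

theorem insert_natCast {α : Type} (xs : List α) (k : Nat) (v : α) (h : k ≤ xs.length) :
    PySem.List.insert xs (k : Int) v = xs.take k ++ v :: xs.drop k := by
  have h0 : ¬ ((k : Int) < 0) := by omega
  have h1 : min (k : Int) (xs.length : Int) = (k : Int) := by omega
  simp [PySem.List.insert, PySem.List.sliceIndices, h0, h1]

-- representation of port A
theorem repA (tf tn fp : String) :
    (add_logging_to_test_function tf tn fp).toList = coreA tf.toList tn.toList fp.toList := by
  have hsp := PySem.Str.split?_map tf "\n"
  have hchars : PySem.Chars.split? tf.toList "\n".toList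
      = some (tf.toList.splitOnP (· == '\n')) := by
    rw [show "\n".toList = ['\n'] from rfl, PySem.Chars.split?]
    simp [splitOn_single]
  rw [hchars] at hsp
  cases hx : PySem.Str.split? tf "\n" with
  | none => rw [hx] at hsp; simp at hsp
  | some LS =>
    rw [hx] at hsp
    have hLS : LS.map String.toList = tf.toList.splitOnP (· == '\n') := by
      simpa using hsp
    rw [add_logging_to_test_function]
    simp only [hx, Option.getD_some]
    rw [findBraceIdxA_eq, hLS, coreA]
    cases hbi : braceIdx? (tf.toList.splitOnP (· == '\n')) with
    | none => simp
    | some j =>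
      have hjlt : j < LS.length := by
        have := braceIdx?_lt hbi
        rwa [← hLS, List.length_map] at this
      have hne : ¬ ((0 : Int) + (j : Int) = -1) := by omega
      simp only [hne, if_false]
      have hcast : (0 : Int) + (j : Int) + 1 = ((j + 1 : Nat) : Int) := by push_cast; omega
      have hslice : PySem.List.slice LS (some ((0 : Int) + (j : Int) + 1)) none = LS.drop (j + 1) := by
        rw [hcast, PySem.List.slice_from LS (by positivity)]
        simp
      have hbody : (PySem.Str.join "\n" (PySem.List.slice LS (some ((0 : Int) + (j : Int) + 1)) none)).toList
          = List.intercalate ['\n'] ((tf.toList.splitOnP (· == '\n')).drop (j + 1)) := by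
        rw [hslice, PySem.Str.toList_join]
        have hmd : List.map String.toList (LS.drop (j + 1)) = (List.map String.toList LS).drop (j + 1) := by
          simp [List.map_drop]
        rw [hmd, hLS]
        rfl
      have hcheck : ∀ b : String,
          (PySem.Str.isIn "SS_LOG_INFO" b && PySem.Str.isIn ("[" ++ tn ++ "]") b)
            = hasLog b.toList tn.toList := by
        intro b
        have hbr : ("[" ++ tn ++ "]").toList = '[' :: (tn.toList ++ [']']) := by
          simp [String.toList_append]
        rw [PySem.Str.isIn_eq, PySem.Str.isIn_eq, hbr]
        simp only [hasLog]
      rw [hcheck]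
      rw [hbody]
      split
      · simp
      · have hlog : ("    " ++ "SS_LOG_INFO(L\"" ++ fp ++ "\", L\"[" ++ tn ++ "] Testing...\");").toList
            = logC tn.toList fp.toList := by
          simp only [String.toList_append, logC]
          have h1 : "    ".toList ++ "SS_LOG_INFO(L\"".toList = "    SS_LOG_INFO(L\"".toList := by decide
          simp [← h1]
        rw [hcast, insert_natCast LS (j + 1) _ (by omega), PySem.Str.toList_join]
        have hmap : List.map String.toList
              (LS.take (j + 1) ++ ("    " ++ "SS_LOG_INFO(L\"" ++ fp ++ "\", L\"[" ++ tn ++ "] Testing...\");") :: LS.drop (j + 1))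
            = (tf.toList.splitOnP (· == '\n')).take (j + 1)
              ++ logC tn.toList fp.toList :: (tf.toList.splitOnP (· == '\n')).drop (j + 1) := by
          rw [List.map_append, List.map_cons, hlog]
          have h2 : List.map String.toList (LS.take (j + 1)) = (List.map String.toList LS).take (j + 1) := by
            simp [List.map_take]
          have h3 : List.map String.toList (LS.drop (j + 1)) = (List.map String.toList LS).drop (j + 1) := by
            simp [List.map_drop]
          rw [h2, h3, hLS]
        rw [hmap]
        rfl

-- representation of port B
theorem repB (tf tn fp : String) :
    (add_logging_to_test_function_alt tf tn fp).toList = coreB tf.toList tn.toList fp.toList := by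
  rw [add_logging_to_test_function_alt]
  simp only [PySem.Str.find_eq, PySem.Str.findFrom_eq]
  rw [show "{".toList = ['{'] from rfl, find_single, coreB]
  by_cases hm : '{' ∈ tf.toList
  · have hlt : tf.toList.idxOf '{' < tf.toList.length := List.idxOf_lt_length_of_mem hm
    have hne : ¬ ((tf.toList.idxOf '{' : Int) = -1) := by omega
    simp only [hm, if_true, hne, if_false, decide_true]
    rw [show "\n".toList = ['\n'] from rfl,
      PySem.Chars.findFrom_natCast tf.toList ['\n'] (tf.toList.idxOf '{') (by omega),
      find_single]
    set p := tf.toList.idxOf '{' with hp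
    by_cases hn : '\n' ∈ tf.toList.drop p
    · have hqlt : (tf.toList.drop p).idxOf '\n' < (tf.toList.drop p).length :=
        List.idxOf_lt_length_of_mem hn
      set q := (tf.toList.drop p).idxOf '\n' with hq
      have hnl : p + q < tf.toList.length := by
        have h2 := hqlt
        rw [List.length_drop] at h2
        omega
      have hsq : tf.toList[p + q]'hnl = '\n' := by
        have h1 : (tf.toList.drop p)[q]'hqlt = '\n' := List.getElem_idxOf hqlt
        rwa [List.getElem_drop] at h1
      have hne2 : ¬ ((q : Int) = -1) := by omega
      simp only [hn, if_true, hne2, if_false, decide_true]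
      have hcast : (p : Int) + (q : Int) ≠ -1 := by omega
      simp only [ne_eq, hcast, not_false_eq_true, if_true, if_false]
      have hcast2 : (p : Int) + (q : Int) + 1 = ((p + q + 1 : Nat) : Int) := by push_cast; omega
      have hbody : (PySem.Str.slice tf (some ((p : Int) + (q : Int) + 1)) none).toList
          = tf.toList.drop (p + q + 1) := by
        rw [PySem.Str.toList_slice, PySem.Chars.slice, hcast2,
          PySem.List.slice_from _ (by positivity)]
        simp
        omega
      have hcheck : ∀ b : String,
          (PySem.Str.isIn "SS_LOG_INFO" b && PySem.Str.isIn ("[" ++ tn ++ "]") b)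
            = hasLog b.toList tn.toList := by
        intro b
        have hbr : ("[" ++ tn ++ "]").toList = '[' :: (tn.toList ++ [']']) := by
          simp [String.toList_append]
        rw [PySem.Str.isIn_eq, PySem.Str.isIn_eq, hbr]
        simp only [hasLog]
      rw [hcheck, hbody]
      split
      · rfl
      · simp only [String.toList_append]
        rw [PySem.Str.toList_slice, PySem.Str.toList_slice, PySem.Chars.slice, PySem.Chars.slice]
        rw [show (p : Int) + (q : Int) = ((p + q : Nat) : Int) by push_cast; omega]
        rw [PySem.List.slice_to _ (by positivity), PySem.List.slice_from _ (by positivity)]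
        simp only [Int.toNat_natCast]
        rw [List.drop_eq_getElem_cons hnl, hsq]
        simp [logC, String.toList_append]
    · simp only [hn, decide_false, if_false]
      have hcheck : ∀ b : String,
          (PySem.Str.isIn "SS_LOG_INFO" b && PySem.Str.isIn ("[" ++ tn ++ "]") b)
            = hasLog b.toList tn.toList := by
        intro b
        have hbr : ("[" ++ tn ++ "]").toList = '[' :: (tn.toList ++ [']']) := by
          simp [String.toList_append]
        rw [PySem.Str.isIn_eq, PySem.Str.isIn_eq, hbr]
        simp only [hasLog]
      simp only [ne_eq, not_true_eq_false, if_false, if_true, reduceIte]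
      rw [hcheck]
      have : ("" : String).toList = ([] : List Char) := rfl
      rw [this]
      split
      · rfl
      · simp [logC, String.toList_append]
  · simp [hm]

-- the main char-level equivalence
theorem core_eq (tn fp : List Char) : ∀ (n : Nat) (s : List Char), s.length ≤ n →
    coreA s tn fp = coreB s tn fp := by
  intro n
  induction n with
  | zero =>
    intro s h
    have : s = [] := List.eq_nil_of_length_eq_zero (by omega)
    subst this
    simp [coreA, coreB, braceIdx?]
  | succ n ih =>
    intro s hlen
    by_cases hn : '\n' ∈ s
    · -- split off the first line
      set k := s.idxOf '\n' with hk
      have hklt : k < s.length := List.idxOf_lt_length_of_mem hn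
      have hsk : s[k]'hklt = '\n' := List.getElem_idxOf hklt
      set l1 := s.take k with hl1
      set rest := s.drop (k + 1) with hrest
      have hs : s = l1 ++ '\n' :: rest := by
        rw [hl1, hrest, ← hsk, ← List.drop_eq_getElem_cons hklt, List.take_append_drop]
      have hnl1 : '\n' ∉ l1 := not_mem_take_idxOf '\n' s
      have hl1len : l1.length = k := by simp [hl1]; omega
      have hrestlen : rest.length ≤ n := by
        rw [hrest]; simp; omega
      have hpieces : s.splitOnP (· == '\n') = l1 :: rest.splitOnP (· == '\n') := by
        rw [hs]
        exact List.splitOnP_first _ l1 (by intro x hx; simp; exact fun h => hnl1 (h ▸ hx)) '\n' (by simp) rest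
      have hs2 : s = (l1 ++ ['\n']) ++ rest := by simp [hs]
      have hL'ne : rest.splitOnP (· == '\n') ≠ [] := List.splitOnP_ne_nil _ rest
      by_cases hb : '{' ∈ l1
      · -- the brace is on the first line: both sides reach the same closed form
        have hA : coreA s tn fp
            = if hasLog rest tn then s
              else l1 ++ '\n' :: (logC tn fp ++ '\n' :: rest) := by
          simp only [coreA, hpieces]
          rw [braceIdx?]
          simp only [hb, if_true]
          norm_num
          rw [intercalate_splitOnP_newline]
          rw [intercalate_cons_ne_nil _ _ (by simp), intercalate_cons_ne_nil _ _ hL'ne,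
            intercalate_splitOnP_newline]
          by_cases hc : hasLog rest tn <;> simp [hc]
        have hms : '{' ∈ s := by rw [hs]; simp [hb]
        have hpl : l1.idxOf '{' < l1.length := List.idxOf_lt_length_of_mem hb
        have hpB : s.idxOf '{' = l1.idxOf '{' := by
          rw [hs, List.idxOf_append]
          simp [hb]
        have hdropB : s.drop (s.idxOf '{') = l1.drop (l1.idxOf '{') ++ '\n' :: rest := by
          rw [hpB, hs, List.drop_append]
          simp [Nat.sub_eq_zero_of_le (le_of_lt hpl)]
        have hnB : '\n' ∈ s.drop (s.idxOf '{') := by rw [hdropB]; simp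
        have hnd : '\n' ∉ l1.drop (l1.idxOf '{') := fun hc => hnl1 (List.mem_of_mem_drop hc)
        have hqB : (s.drop (s.idxOf '{')).idxOf '\n' = l1.length - l1.idxOf '{' := by
          rw [hdropB, List.idxOf_append]
          simp [hnd, List.idxOf_cons]
        have hnlB : s.idxOf '{' + (s.drop (s.idxOf '{')).idxOf '\n' = l1.length := by
          rw [hqB]; omega
        have htakeB : s.take l1.length = l1 := by rw [hs, List.take_left]
        have hdrop2 : s.drop (l1.length + 1) = rest := by
          rw [hs2, show l1.length + 1 = (l1 ++ ['\n']).length by simp, List.drop_left]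
        have hB : coreB s tn fp
            = if hasLog rest tn then s
              else l1 ++ '\n' :: (logC tn fp ++ '\n' :: rest) := by
          simp only [coreB, hms, if_true, hnB, hnlB, htakeB, hdrop2]
        rw [hA, hB]
      · by_cases hbr : '{' ∈ rest
        · -- the brace is further down: both sides keep the first line and recurse
          obtain ⟨j', hj'⟩ : ∃ j', braceIdx? (rest.splitOnP (· == '\n')) = some j' := by
            cases hbi : braceIdx? (rest.splitOnP (· == '\n')) with
            | none =>
              obtain ⟨l, hl, hal⟩ := (mem_splitOnP_iff (a := '{') (c := '\n') (by decide) rest).mpr hbr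
              exact absurd hal (braceIdx?_none_iff.mp hbi l hl)
            | some j' => exact ⟨j', rfl⟩
          have hAs : coreA s tn fp = l1 ++ '\n' :: coreA rest tn fp := by
            simp only [coreA, hpieces]
            rw [braceIdx?]
            simp only [hb, if_false, hj', Option.map_some, List.drop_succ_cons,
              List.take_succ_cons, List.cons_append]
            by_cases hc : hasLog (List.intercalate ['\n'] ((rest.splitOnP (· == '\n')).drop (j' + 1))) tn
            · simp [hc, hs]
            · simp only [hc, if_false]
              rw [intercalate_cons_ne_nil _ _ (by simp)]
              simp
          have hms : '{' ∈ s := by rw [hs]; simp [hbr]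
          have hpB : s.idxOf '{' = l1.length + 1 + rest.idxOf '{' := by
            rw [hs, List.idxOf_append]
            simp only [hb, if_false]
            rw [List.idxOf_cons, show ('\n' == '{') = false from rfl, Bool.cond_false]
            omega
          have hdropgen : ∀ m : Nat, s.drop (l1.length + 1 + m) = rest.drop m := by
            intro m
            rw [hs2, List.drop_append, List.drop_eq_nil_of_le (by simp), List.nil_append]
            congr 1
            simp
          have htakegen : ∀ m : Nat, s.take (l1.length + 1 + m) = l1 ++ '\n' :: rest.take m := by
            intro m
            rw [hs2, List.take_append, List.take_of_length_le (by simp)]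
            have : l1.length + 1 + m - (l1 ++ ['\n']).length = m := by simp
            rw [this]
            simp
          have hBs : coreB s tn fp = l1 ++ '\n' :: coreB rest tn fp := by
            simp only [coreB, hms, if_true, hbr, if_true, hpB, hdropgen (rest.idxOf '{')]
            by_cases hnn : '\n' ∈ rest.drop (rest.idxOf '{')
            · simp only [hnn, if_true]
              rw [show l1.length + 1 + rest.idxOf '{' + (rest.drop (rest.idxOf '{')).idxOf '\n' + 1
                    = l1.length + 1 + (rest.idxOf '{' + (rest.drop (rest.idxOf '{')).idxOf '\n' + 1)
                  from by omega]
              rw [hdropgen (rest.idxOf '{' + (rest.drop (rest.idxOf '{')).idxOf '\n' + 1)]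
              rw [show l1.length + 1 + rest.idxOf '{' + (rest.drop (rest.idxOf '{')).idxOf '\n'
                    = l1.length + 1 + (rest.idxOf '{' + (rest.drop (rest.idxOf '{')).idxOf '\n')
                  from by omega]
              rw [htakegen (rest.idxOf '{' + (rest.drop (rest.idxOf '{')).idxOf '\n')]
              by_cases hc : hasLog (rest.drop (rest.idxOf '{' + (rest.drop (rest.idxOf '{')).idxOf '\n' + 1)) tn
              · simp [hc, hs]
              · simp [hc]
            · simp only [hnn, if_false]
              by_cases hc : hasLog [] tn
              · simp [hc, hs]
              · simp [hc, hs]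
          rw [hAs, hBs, ih rest hrestlen]
        · -- no brace anywhere: both sides return s unchanged
          have hms : '{' ∉ s := by
            rw [hs]; simp [hb, hbr]
          have hnone : braceIdx? (rest.splitOnP (· == '\n')) = none :=
            braceIdx?_none_iff.mpr
              (fun l hl hal => hbr ((mem_splitOnP_iff (a := '{') (c := '\n') (by decide) rest).mp ⟨l, hl, hal⟩))
          rw [coreA, coreB]
          simp only [hpieces]
          rw [braceIdx?]
          simp [hb, hnone, hms]
    · -- single line: no '\n' in s
      have hpieces : s.splitOnP (· == '\n') = [s] :=
        List.splitOnP_eq_single _ s (by intro x hx; simp; exact fun h => hn (h ▸ hx))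
      by_cases hb : '{' ∈ s
      · have hdropnl : '\n' ∉ s.drop (s.idxOf '{') := fun h => hn (List.mem_of_mem_drop h)
        rw [coreA, coreB]
        simp only [hpieces, braceIdx?, hb, if_true, hdropnl, decide_false, if_false, decide_true]
        simp [List.intercalate, List.intersperse]
      · rw [coreA, coreB]
        simp only [hpieces, braceIdx?, hb, if_false, decide_false]
        simp [braceIdx?]

-- ===== VERDICT (by name: the statement is the Claim_ definition above) =====
theorem add_logging_to_test_function_spec : Claim_equal_add_logging_to_test_function := by
  intro tf tn fp _
  unfold Spec_add_logging_to_test_function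
  apply String.ext
  rw [repA, repB, core_eq tn.toList fp.toList tf.toList.length tf.toList (le_refl _)]
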